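-- pv_equiv track=rewrite | github.com/prasunroy/ocr | scan.py | endpoints
-- ===== SOURCE A (Python) =====
-- def endpoints(array):
--     end_0 = -1
--     end_1 = -1
--
--     if array[0] != 0:
--         end_0 = 0
--     if array[-1] != 0:
--         end_1 = len(array)
--
--     i = 0
--     j = len(array) - 1
--
--     while i <= j and (end_0 < 0 or end_1 < 0):
--         if array[i] == 0:
--             i += 1
--         elif end_0 < 0:
--             end_0 = i - 1
--
--         if array[j] == 0:
--             j -= 1
--         elif end_1 < 0:
--             end_1 = j + 1
--
--     if end_0 < 0:
--         end_0 = 0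
--     if end_1 < 0:
--         end_1 = len(array)
--
--     return (end_0, end_1)
-- ===== SOURCE B (Python) =====
-- def endpoints(array):
--     nz = [i for i in range(len(array)) if array[i] != 0]
--     if nz:
--         return (max(0, nz[0] - 1), nz[-1] + 1)
--     return (0, len(array))
-- ===== Notes on version B (the rewrite author's own statement) =====
-- stated objective: simpler
-- what changed: Replaces A's interleaved two-pointer while-loop with flag variables and post-loop patching by materializing the list of non-zero indices in one comprehension and computing both endpoints in closed form from its first and last element.
import Mathlib
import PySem

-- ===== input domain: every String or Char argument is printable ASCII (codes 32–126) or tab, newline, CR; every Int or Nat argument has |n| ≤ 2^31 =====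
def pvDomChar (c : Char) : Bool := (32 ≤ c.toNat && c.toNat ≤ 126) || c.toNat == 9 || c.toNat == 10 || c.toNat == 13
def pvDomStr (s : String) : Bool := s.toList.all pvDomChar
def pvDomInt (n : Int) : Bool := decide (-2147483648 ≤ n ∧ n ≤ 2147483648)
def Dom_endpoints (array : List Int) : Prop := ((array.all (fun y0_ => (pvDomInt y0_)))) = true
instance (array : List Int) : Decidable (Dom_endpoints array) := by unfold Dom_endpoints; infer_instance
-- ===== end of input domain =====

-- B materializes the list of non-zero indices once and reads both endpoints off its first
-- and last element, replacing A's interleaved two-pointer flag loop; objective: simpler.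
-- (Return values only; neither program mutates its argument.)

-- ===== PORT A =====
-- A's while loop; the Nat argument is a totality fuel (arr.length + 4 always suffices,
-- proved in pvLoopA_correct below); indices stay in range while the guard holds, so
-- array[i] / array[j] are ported as pyGetD.
def pvLoopA (arr : List Int) : Nat → Int → Int → Int → Int → Int × Int
  | 0, _, _, e0, e1 => (e0, e1)
  | fuel + 1, i, j, e0, e1 =>
    if i ≤ j ∧ (e0 < 0 ∨ e1 < 0) then
      let ai := PySem.List.pyGetD arr i 0
      let i' := if ai = 0 then i + 1 else i
      let e0' := if ai = 0 then e0 else if e0 < 0 then i - 1 else e0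
      let aj := PySem.List.pyGetD arr j 0
      let j' := if aj = 0 then j - 1 else j
      let e1' := if aj = 0 then e1 else if e1 < 0 then j + 1 else e1
      pvLoopA arr fuel i' j' e0' e1'
    else (e0, e1)

def endpoints (array : List Int) : Int × Int :=
  let n : Int := PySem.List.len array
  -- A's reads of the first and last element raise IndexError on the empty list: excluded by Pre_endpoints
  let e0 : Int := if PySem.List.pyGetD array 0 0 ≠ 0 then 0 else -1
  let e1 : Int := if PySem.List.pyGetD array (-1) 0 ≠ 0 then n else -1
  let r := pvLoopA array (array.length + 4) 0 (n - 1) e0 e1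
  (if r.1 < 0 then 0 else r.1, if r.2 < 0 then n else r.2)

-- ===== PORT B =====
-- nz = [i for i in range(len(array)) if array[i] != 0]   (indices are in range, so pyGetD is exact)
def pvNz (array : List Int) : List Int :=
  (PySem.List.pyRange 0 (PySem.List.len array) 1).filter
    (fun i => PySem.List.pyGetD array i 0 != 0)

def endpoints_alt (array : List Int) : Int × Int :=
  let nz := pvNz array
  match nz.head?, nz.getLast? with          -- nz[0] and nz[-1], guarded by 'if nz:'
  | some f, some l => (max 0 (f - 1), l + 1)
  | _, _ => (0, PySem.List.len array)

-- ===== PRECONDITION & SPEC =====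
-- Pre_ excludes exactly the empty list, on which A raises IndexError reading the first element.
def Pre_endpoints (array : List Int) : Prop := array ≠ []
instance (array : List Int) : Decidable (Pre_endpoints array) := by unfold Pre_endpoints; infer_instance
def pvWitness_endpoints : List Int := [0, 3, 0]

def Spec_endpoints (array : List Int) (out : Int × Int) : Prop := out = endpoints_alt array
instance (array : List Int) (out : Int × Int) : Decidable (Spec_endpoints array out) := by unfold Spec_endpoints; infer_instance

-- ===== CLAIM (what is proved, stated in full; the proofs are below) =====
def Claim_equal_endpoints : Prop := ∀ (array : List Int), Dom_endpoints array → Pre_endpoints array → Spec_endpoints array (endpoints array)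

-- ===== LEMMAS AND PROOFS =====

theorem pvFind_pyRange_eq_some (p : Int → Bool) (a b f : Int) (ha : a ≤ f) (hb : f < b)
    (hp : p f = true) (hmin : ∀ k, a ≤ k → k < f → p k = false) :
    (PySem.List.pyRange a b 1).find? p = some f := by
  rw [PySem.List.pyRange_one_append a f b ha (le_of_lt hb), List.find?_append]
  have h1 : (PySem.List.pyRange a f 1).find? p = none := by
    apply List.find?_eq_none.mpr
    intro x hx
    rw [PySem.List.mem_pyRange_one] at hx
    simp [hmin x hx.1 hx.2]
  rw [h1, PySem.List.pyRange_one_cons hb]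
  simp [hp]

theorem pvFind_pyRange_eq_none (p : Int → Bool) (a b : Int)
    (h : ∀ k, a ≤ k → k < b → p k = false) :
    (PySem.List.pyRange a b 1).find? p = none := by
  apply List.find?_eq_none.mpr
  intro x hx
  rw [PySem.List.mem_pyRange_one] at hx
  simp [h x hx.1 hx.2]

theorem pvFind_pyRangeRev_eq_some (p : Int → Bool) (n l : Int) (hl : 0 ≤ l) (hn : l < n)
    (hp : p l = true) (hmax : ∀ k, l < k → k < n → p k = false) :
    (PySem.List.pyRange (n - 1) (-1) (-1)).find? p = some l := by
  have e : PySem.List.pyRange (n-1) (-1) (-1) = (PySem.List.pyRange 0 n 1).reverse := by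
    rw [PySem.List.pyRange_neg_one_eq_reverse]; norm_num
  rw [e, PySem.List.pyRange_one_append 0 (l+1) n (by omega) (by omega), List.reverse_append,
      List.find?_append]
  have h1 : ((PySem.List.pyRange (l+1) n 1).reverse).find? p = none := by
    apply List.find?_eq_none.mpr
    intro x hx
    rw [List.mem_reverse, PySem.List.mem_pyRange_one] at hx
    simp [hmax x (by omega) hx.2]
  rw [h1]
  have e2 : (PySem.List.pyRange 0 (l+1) 1).reverse = PySem.List.pyRange l (-1) (-1) := by
    rw [PySem.List.pyRange_neg_one_eq_reverse]; norm_num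
  rw [e2, PySem.List.pyRange_neg_one_cons (by omega)]
  simp [hp]

theorem pvFind_pyRangeRev_eq_none (p : Int → Bool) (n : Int)
    (h : ∀ k, 0 ≤ k → k < n → p k = false) :
    (PySem.List.pyRange (n - 1) (-1) (-1)).find? p = none := by
  apply List.find?_eq_none.mpr
  intro x hx
  rw [PySem.List.mem_pyRange_neg_one] at hx
  simp [h x (by omega) (by omega)]

def pvP (arr : List Int) : Int → Bool := fun k => PySem.List.pyGetD arr k 0 != 0
def pvF (arr : List Int) : Option Int := (PySem.List.pyRange 0 (PySem.List.len arr) 1).find? (pvP arr)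
def pvL (arr : List Int) : Option Int := (PySem.List.pyRange (PySem.List.len arr - 1) (-1) (-1)).find? (pvP arr)

theorem pvF_eq_head (arr : List Int) : pvF arr = (pvNz arr).head? :=
  (List.head?_filter).symm

theorem pvL_eq_getLast (arr : List Int) : pvL arr = (pvNz arr).getLast? := by
  have e : PySem.List.pyRange (PySem.List.len arr - 1) (-1) (-1)
      = (PySem.List.pyRange 0 (PySem.List.len arr) 1).reverse := by
    rw [PySem.List.pyRange_neg_one_eq_reverse]; norm_num
  rw [pvL, e, ← List.head?_filter, List.filter_reverse, List.head?_reverse]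
  rfl

theorem pvAlt_eq (arr : List Int) :
    endpoints_alt arr = ((match pvF arr with | none => (0:Int) | some f => max 0 (f-1)),
                         (match pvL arr with | none => PySem.List.len arr | some l => l + 1)) := by
  rw [pvF_eq_head, pvL_eq_getLast]
  cases h : pvNz arr with
  | nil => simp [endpoints_alt, h]
  | cons a t =>
    have hl : (a :: t).getLast? = some ((a :: t).getLast (List.cons_ne_nil a t)) := by
      simp [List.getLast?_eq_some_getLast]
    simp only [endpoints_alt, h, List.head?_cons, hl]

theorem pvLoopA_correct (arr : List Int) (fuel : Nat) :
    ∀ i j e0 e1 : Int,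
    0 ≤ i → j ≤ (arr.length : Int) - 1 →
    (∀ k : Int, 0 ≤ k → k < i → PySem.List.pyGetD arr k 0 = 0) →
    (∀ k : Int, j < k → k < (arr.length : Int) → PySem.List.pyGetD arr k 0 = 0) →
    (e0 < 0 → PySem.List.pyGetD arr 0 0 = 0) →
    (0 ≤ e0 → e0 = (endpoints_alt arr).1) →
    (e1 < 0 → PySem.List.pyGetD arr ((arr.length : Int) - 1) 0 = 0) →
    (0 ≤ e1 → e1 = (endpoints_alt arr).2) →
    ((j - i + 2).toNat + (if e0 < 0 then 1 else 0) + (if e1 < 0 then 1 else 0) ≤ fuel) →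
    ((if (pvLoopA arr fuel i j e0 e1).1 < 0 then 0 else (pvLoopA arr fuel i j e0 e1).1),
     (if (pvLoopA arr fuel i j e0 e1).2 < 0 then (arr.length : Int) else (pvLoopA arr fuel i j e0 e1).2))
      = endpoints_alt arr := by
  have hlen : PySem.List.len arr = (arr.length : Int) := PySem.List.len_eq arr
  induction fuel with
  | zero =>
    intro i j e0 e1 h0 h1 h2 h3 h4 h5 h6 h7 hm
    have he0 : 0 ≤ e0 := by by_contra h; simp [show e0 < 0 by omega] at hm
    have he1 : 0 ≤ e1 := by by_contra h; simp [show e1 < 0 by omega] at hm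
    simp only [pvLoopA]
    rw [if_neg (by omega), if_neg (by omega), h5 he0, h7 he1]
  | succ fuel IH =>
    intro i j e0 e1 h0 h1 h2 h3 h4 h5 h6 h7 hm
    by_cases hg : i ≤ j ∧ (e0 < 0 ∨ e1 < 0)
    · obtain ⟨hij, hflag⟩ := hg
      simp only [pvLoopA, if_pos (And.intro hij hflag)]
      by_cases hai : PySem.List.pyGetD arr i 0 = 0
      · -- i advances
        by_cases haj : PySem.List.pyGetD arr j 0 = 0
        · -- j retreats
          simp only [hai, haj]
          apply IH (i+1) (j-1) e0 e1 (by omega) (by omega)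
          · intro k hk1 hk2
            rcases lt_or_ge k i with h|h
            · exact h2 k hk1 h
            · have : k = i := by omega
              rw [this]; exact hai
          · intro k hk1 hk2
            rcases lt_or_ge j k with h|h
            · exact h3 k h hk2
            · have : k = j := by omega
              rw [this]; exact haj
          · exact h4
          · exact h5
          · exact h6
          · exact h7
          · split_ifs at hm ⊢ <;> omega
        · -- j side: arr[j] ≠ 0
          by_cases he1 : e1 < 0
          · -- e1 gets set to j + 1
            simp only [hai, haj, he1, if_false]
            have hL : pvL arr = some j := by
              rw [pvL, hlen]
              exact pvFind_pyRangeRev_eq_some (pvP arr) _ j (by omega) (by omega)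
                (by simp [pvP, haj]) (fun k hk1 hk2 => by simp [pvP, h3 k hk1 hk2])
            apply IH (i+1) j e0 (j+1) (by omega) h1
            · intro k hk1 hk2
              rcases lt_or_ge k i with h|h
              · exact h2 k hk1 h
              · have : k = i := by omega
                rw [this]; exact hai
            · exact h3
            · exact h4
            · exact h5
            · intro h; omega
            · intro _; rw [pvAlt_eq, hL]
            · split_ifs at hm ⊢ <;> omega
          · -- e1 already set, j side does nothing
            simp only [hai, haj, he1, if_false]
            apply IH (i+1) j e0 e1 (by omega) h1
            · intro k hk1 hk2
              rcases lt_or_ge k i with h|h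
              · exact h2 k hk1 h
              · have : k = i := by omega
                rw [this]; exact hai
            · exact h3
            · exact h4
            · exact h5
            · exact h6
            · exact h7
            · split_ifs at hm ⊢ <;> omega
      · -- arr[i] ≠ 0 : i frozen
        have he0 : e0 < 0 ∨ 0 ≤ e0 := by omega
        by_cases he0' : e0 < 0
        · -- e0 gets set to i - 1
          have hi1 : 1 ≤ i := by
            rcases lt_or_ge i 1 with h|h
            · exfalso
              have hi0 : i = 0 := by omega
              rw [hi0] at hai; exact hai (h4 he0')
            · exact h
          have hF : pvF arr = some i := by
            rw [pvF, hlen]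
            exact pvFind_pyRange_eq_some (pvP arr) 0 _ i h0 (by omega)
              (by simp [pvP, hai]) (fun k hk1 hk2 => by simp [pvP, h2 k hk1 hk2])
          have halt1 : (endpoints_alt arr).1 = i - 1 := by
            rw [pvAlt_eq, hF]; simp; omega
          by_cases haj : PySem.List.pyGetD arr j 0 = 0
          · simp only [hai, haj, he0']
            apply IH i (j-1) (i-1) e1 h0 (by omega) h2
            · intro k hk1 hk2
              rcases lt_or_ge j k with h|h
              · exact h3 k h hk2
              · have : k = j := by omega
                rw [this]; exact haj
            · intro h; omega
            · intro _; omega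
            · exact h6
            · exact h7
            · split_ifs at hm ⊢ <;> omega
          · by_cases he1 : e1 < 0
            · simp only [hai, haj, he0', he1]
              have hL : pvL arr = some j := by
                rw [pvL, hlen]
                exact pvFind_pyRangeRev_eq_some (pvP arr) _ j (by omega) (by omega)
                  (by simp [pvP, haj]) (fun k hk1 hk2 => by simp [pvP, h3 k hk1 hk2])
              apply IH i j (i-1) (j+1) h0 h1 h2 h3
              · intro h; omega
              · intro _; omega
              · intro h; omega
              · intro _; rw [pvAlt_eq, hL]
              · split_ifs at hm ⊢ <;> omega
            · simp only [hai, haj, he0', he1]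
              apply IH i j (i-1) e1 h0 h1 h2 h3
              · intro h; omega
              · intro _; omega
              · exact h6
              · exact h7
              · split_ifs at hm ⊢ <;> omega
        · -- e0 already set: guard forces e1 < 0
          have he1 : e1 < 0 := Or.resolve_left hflag he0'
          by_cases haj : PySem.List.pyGetD arr j 0 = 0
          · simp only [hai, haj, he0', he1]
            apply IH i (j-1) e0 e1 h0 (by omega) h2
            · intro k hk1 hk2
              rcases lt_or_ge j k with h|h
              · exact h3 k h hk2
              · have : k = j := by omega
                rw [this]; exact haj
            · exact h4
            · exact h5
            · exact h6
            · exact h7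
            · split_ifs at hm ⊢; omega
          · simp only [hai, haj, he0', he1]
            have hL : pvL arr = some j := by
              rw [pvL, hlen]
              exact pvFind_pyRangeRev_eq_some (pvP arr) _ j (by omega) (by omega)
                (by simp [pvP, haj]) (fun k hk1 hk2 => by simp [pvP, h3 k hk1 hk2])
            apply IH i j e0 (j+1) h0 h1 h2 h3 h4 h5
            · intro h; omega
            · intro _; rw [pvAlt_eq, hL]
            · split_ifs at hm ⊢ <;> omega
    · -- guard false: loop exits
      simp only [pvLoopA, if_neg hg]
      rcases lt_or_ge j i with hij | hij
      swap
      · have hg' := hg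
        have hflags : 0 ≤ e0 ∧ 0 ≤ e1 := by
          by_contra hc
          exact hg ⟨hij, by omega⟩
        rw [if_neg (by omega), if_neg (by omega), h5 hflags.1, h7 hflags.2]
      · -- i > j : every entry is zero
        have hall : ∀ k : Int, 0 ≤ k → k < (arr.length : Int) → PySem.List.pyGetD arr k 0 = 0 := by
          intro k hk1 hk2
          rcases lt_or_ge k i with h|h
          · exact h2 k hk1 h
          · exact h3 k (by omega) hk2
        have hF : pvF arr = none := by
          rw [pvF, hlen]
          exact pvFind_pyRange_eq_none (pvP arr) 0 _ (fun k hk1 hk2 => by simp [pvP, hall k hk1 hk2])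
        have hL : pvL arr = none := by
          rw [pvL, hlen]
          exact pvFind_pyRangeRev_eq_none (pvP arr) _ (fun k hk1 hk2 => by simp [pvP, hall k hk1 hk2])
        have halt : endpoints_alt arr = (0, (arr.length : Int)) := by
          rw [pvAlt_eq, hF, hL, hlen]
        have g1 : (if e0 < 0 then (0:Int) else e0) = (endpoints_alt arr).1 := by
          rcases lt_or_ge e0 0 with h|h
          · simp [h, halt]
          · rw [if_neg (by omega)]; exact h5 h
        have g2 : (if e1 < 0 then ((arr.length : Int)) else e1) = (endpoints_alt arr).2 := by
          rcases lt_or_ge e1 0 with h|h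
          · simp [h, halt]
          · rw [if_neg (by omega)]; exact h7 h
        rw [g1, g2]

theorem endpoints_eq (arr : List Int) (hne : arr ≠ []) : endpoints arr = endpoints_alt arr := by
  have hlen0 : 0 < arr.length := List.length_pos_iff.mpr hne
  have hlast : PySem.List.pyGetD arr ((arr.length : Int) - 1) 0 = PySem.List.pyGetD arr (-1) 0 := by
    rw [PySem.List.pyGetD_neg_one arr 0 hne,
        PySem.List.pyGetD_eq_getElem arr 0 (by omega) (by omega)]
    have h : ((arr.length : Int) - 1).toNat = arr.length - 1 := by omega
    simp [h, List.getLast_eq_getElem]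
  have hvac2 : ∀ k : Int, 0 ≤ k → k < 0 → PySem.List.pyGetD arr k 0 = 0 :=
    fun k hk1 hk2 => absurd hk2 (by omega)
  have hvac3 : ∀ k : Int, (arr.length : Int) - 1 < k → k < (arr.length : Int) →
      PySem.List.pyGetD arr k 0 = 0 :=
    fun k hk1 hk2 => absurd hk2 (by omega)
  have hF0 : PySem.List.pyGetD arr 0 0 ≠ 0 → (endpoints_alt arr).1 = 0 := by
    intro c
    have hF : pvF arr = some 0 := by
      rw [pvF, PySem.List.len_eq]
      exact pvFind_pyRange_eq_some (pvP arr) 0 _ 0 le_rfl (by omega)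
        (by simp [pvP]; exact c) (fun k hk1 hk2 => absurd hk2 (by omega))
    rw [pvAlt_eq, hF]
    simp
  have hL0 : PySem.List.pyGetD arr (-1) 0 ≠ 0 → (endpoints_alt arr).2 = (arr.length : Int) := by
    intro c
    have hL : pvL arr = some ((arr.length : Int) - 1) := by
      rw [pvL, PySem.List.len_eq]
      exact pvFind_pyRangeRev_eq_some (pvP arr) _ _ (by omega) (by omega)
        (by simp [pvP]; rw [hlast]; exact c) (fun k hk1 hk2 => absurd hk2 (by omega))
    rw [pvAlt_eq, hL]
    simp
  have hmeas : ∀ a b : Int, (if a < 0 then 1 else 0) + (if b < 0 then 1 else 0) +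
      (((arr.length : Int) - 1) - 0 + 2).toNat ≤ arr.length + 4 := by
    intro a b; split_ifs <;> omega
  rw [endpoints]
  simp only [PySem.List.len_eq]
  by_cases c0 : PySem.List.pyGetD arr 0 0 = 0 <;> by_cases c1 : PySem.List.pyGetD arr (-1) 0 = 0 <;>
    simp only [c0, c1, ne_eq, not_true_eq_false, not_false_eq_true, if_true, if_false,
               ]
  · exact pvLoopA_correct arr (arr.length + 4) 0 _ (-1) (-1) le_rfl le_rfl hvac2 hvac3
      (fun _ => c0) (fun h => absurd h (by omega)) (fun _ => hlast.trans c1)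
      (fun h => absurd h (by omega)) (by have := hmeas (-1 : Int) (-1 : Int); omega)
  · exact pvLoopA_correct arr (arr.length + 4) 0 _ (-1) _ le_rfl le_rfl hvac2 hvac3
      (fun _ => c0) (fun h => absurd h (by omega)) (fun h => absurd h (by omega))
      (fun _ => (hL0 c1).symm) (by have := hmeas (-1 : Int) ((arr.length : Int)); omega)
  · exact pvLoopA_correct arr (arr.length + 4) 0 _ 0 (-1) le_rfl le_rfl hvac2 hvac3
      (fun h => absurd h (by omega)) (fun _ => (hF0 c0).symm) (fun _ => hlast.trans c1)
      (fun h => absurd h (by omega)) (by have := hmeas (0 : Int) (-1 : Int); omega)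
  · exact pvLoopA_correct arr (arr.length + 4) 0 _ 0 _ le_rfl le_rfl hvac2 hvac3
      (fun h => absurd h (by omega)) (fun _ => (hF0 c0).symm) (fun h => absurd h (by omega))
      (fun _ => (hL0 c1).symm) (by have := hmeas (0 : Int) ((arr.length : Int)); omega)

-- ===== VERDICT (by name: the statement is the Claim_ definition above) =====
theorem endpoints_spec : Claim_equal_endpoints := by
  intro arr _ hne
  unfold Spec_endpoints
  exact endpoints_eq arr hne
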